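-- pv_equiv track=rewrite | github.com/ankokudzura/lab_3 | Задача 5.py | check
-- ===== SOURCE A (Python) =====
-- def check(a,b):
--     t=[]
--     ta=0
--     D=False
--     for y in range(len(a)):
--         f=False
--         tb = 0
--         e = ''
--         for i in range(ta, len(a)):
--             for j in range(tb, len(b)):
--                 if a[i] == b[j]:
--                     e+=a[i]
--                     tb=j+1
--                     break
--         ta+=1
--         t+=[e]
--     max=0
--     M=''
--     for i in t:
--         if len(i)>max:
--             max=len(i)
--             M=i
--     return(M)
-- ===== SOURCE B (Python) =====
-- def check(a, b):
--     n, m = len(a), len(b)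
--     # next-occurrence tables: nxt[p] maps ch -> smallest j >= p with b[j] == ch
--     nxt = [{}]
--     for j in range(m - 1, -1, -1):
--         d = dict(nxt[0])
--         d[b[j]] = j
--         nxt.insert(0, d)
--     # bottom-up DP over states (i, pos): row[pos] = length of greedy match of a[i:]
--     # into b from pos; only the previous row and the first column are kept
--     prev = [0] * (m + 1)
--     col0 = []
--     for i in range(n - 1, -1, -1):
--         ai = a[i]
--         cur = [1 + prev[j + 1] if (j := nxt[pos].get(ai)) is not None else prev[pos]
--                for pos in range(m + 1)]
--         col0.insert(0, cur[0])
--         prev = cur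
--     # first start with strictly maximal length (A's strict-> scan order)
--     best_len, best_i = 0, -1
--     for i in range(n):
--         if col0[i] > best_len:
--             best_len, best_i = col0[i], i
--     if best_i < 0:
--         return ''
--     # reconstruct the single winning string
--     res, pos = [], 0
--     for i in range(best_i, n):
--         j = nxt[pos].get(a[i])
--         if j is not None:
--             res.append(a[i])
--             pos = j + 1
--     return ''.join(res)
-- ===== Notes on version B (the rewrite author's own statement) =====
-- stated objective: alternative
-- what changed: Replaces A's n independent greedy scans (one full rescan of b per suffix of a, all n result strings collected then scanned) by a bottom-up dynamic program over states (i,pos) that shares work across all starts: a next-occurrence table of b plus a length-table row swept once, then first-argmax selection on the first column and a single reconstruction of the winning string.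
import Mathlib
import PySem

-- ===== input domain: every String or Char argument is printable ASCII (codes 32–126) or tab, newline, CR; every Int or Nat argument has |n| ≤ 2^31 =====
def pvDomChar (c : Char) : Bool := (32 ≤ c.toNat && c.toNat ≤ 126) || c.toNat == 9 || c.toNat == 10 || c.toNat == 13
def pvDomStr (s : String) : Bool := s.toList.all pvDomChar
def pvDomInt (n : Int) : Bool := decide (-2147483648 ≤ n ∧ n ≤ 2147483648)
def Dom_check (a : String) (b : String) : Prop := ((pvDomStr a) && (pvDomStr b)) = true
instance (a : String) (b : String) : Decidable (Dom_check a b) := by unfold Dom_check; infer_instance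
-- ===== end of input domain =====

-- B replaces A's n independent greedy rescans of b (one per suffix of a, all results kept and
-- scanned) by a bottom-up dynamic program over states (i, pos) built once, first-argmax
-- selection on the length table and a single reconstruction of the winning string.

-- ===== PORT A =====
-- the innermost 'for j in range(tb, len(b)): if a[i]==b[j]: e+=a[i]; tb=j+1; break'
def jloopA (lb : List Char) (c : Char) (js : List Int) (s : Int × List Char) : Int × List Char :=
  match js with
  | [] => s
  | j :: js' => if PySem.List.pyGetD lb j ' ' == c then (j + 1, s.2 ++ [c]) else jloopA lb c js' s

def check (a : String) (b : String) : String :=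
  let la := a.toList
  let lb := b.toList
  -- t=[]; ta=0  (D and f are dead variables of A)
  let st := (PySem.List.pyRange 0 la.length).foldl
    (fun (s : Int × List (List Char)) _y =>
      -- tb=0; e=''; for i in range(ta, len(a)): inner j-loop
      let inner := (PySem.List.pyRange s.1 la.length).foldl
        (fun (ie : Int × List Char) i =>
          jloopA lb (PySem.List.pyGetD la i ' ') (PySem.List.pyRange ie.1 lb.length) ie)
        (0, [])
      (s.1 + 1, s.2 ++ [inner.2]))
    (0, [])
  -- max=0; M=''
  let mm := st.2.foldl
    (fun (s : Int × List Char) i => if (i.length : Int) > s.1 then ((i.length : Int), i) else s)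
    (0, [])
  String.ofList mm.2

-- ===== PORT B =====
-- 'for j in range(m-1,-1,-1): d = dict(nxt[0]); d[b[j]] = j; nxt.insert(0, d)'
-- as the structural recursion on b (position off is produced after positions off+1..m)
def tblB (lb : List Char) (off : Int) : List (PySem.Dict Char Int) :=
  match lb with
  | [] => [PySem.Dict.empty]
  | c :: rest =>
    let t := tblB rest (off + 1)
    (PySem.Dict.insert (t.headD PySem.Dict.empty) c off) :: t

-- 'cur = [1 + prev[j+1] if (j := nxt[pos].get(ai)) is not None else prev[pos] for pos in range(m+1)]'
def mkRowB (nxt : List (PySem.Dict Char Int)) (m : Nat) (c : Char) (prev : List Int) : List Int :=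
  (PySem.List.pyRange 0 ((m : Int) + 1)).map
    (fun pos =>
      match PySem.Dict.get? (PySem.List.pyGetD nxt pos PySem.Dict.empty) c with
      | some j => 1 + PySem.List.pyGetD prev (j + 1) 0
      | none => PySem.List.pyGetD prev pos 0)

-- 'prev = [0]*(m+1); col0 = []; for i in range(n-1,-1,-1): cur = ...; col0.insert(0, cur[0]); prev = cur'
-- as the structural recursion on a (the row for index i is built after the rows for i+1..n);
-- the pair is (prev row, col0)
def colB (nxt : List (PySem.Dict Char Int)) (m : Nat) (cs : List Char) : List Int × List Int :=
  match cs with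
  | [] => (List.replicate (m + 1) (0 : Int), [])
  | c :: rest =>
    let t := colB nxt m rest
    let cur := mkRowB nxt m c t.1
    (cur, PySem.List.pyGetD cur 0 0 :: t.2)

def check_alt (a : String) (b : String) : String :=
  let la := a.toList
  let lb := b.toList
  let nxt := tblB lb 0
  let col0 := (colB nxt lb.length la).2
  -- best_len, best_i = 0, -1; for i in range(n): if col0[i] > best_len: ...
  let best := (PySem.List.pyRange 0 la.length).foldl
    (fun (s : Int × Int) i =>
      let w := PySem.List.pyGetD col0 i 0
      if w > s.1 then (w, i) else s)
    (0, -1)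
  if best.2 < 0 then "" else
    -- res, pos = [], 0; for i in range(best_i, n): single reconstruction via nxt
    let res := (PySem.List.pyRange best.2 la.length).foldl
      (fun (s : List Char × Int) i =>
        match PySem.Dict.get? (PySem.List.pyGetD nxt s.2 PySem.Dict.empty) (PySem.List.pyGetD la i ' ') with
        | none => s
        | some j => (s.1 ++ [PySem.List.pyGetD la i ' '], j + 1))
      ([], 0)
    String.ofList res.1

-- ===== PRECONDITION & SPEC =====
def Spec_check (a : String) (b : String) (out : String) : Prop := out = check_alt a b
instance (a : String) (b : String) (out : String) : Decidable (Spec_check a b out) := by unfold Spec_check; infer_instance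

-- ===== CLAIM (what is proved, stated in full; the proofs are below) =====
def Claim_equal_check : Prop := ∀ (a : String) (b : String), Dom_check a b → Spec_check a b (check a b)

-- ===== LEMMAS AND PROOFS =====

-- first index j ≥ tb with lb[j] == c : the greedy primitive both algorithms realise
def find1 (lb : List Char) (tb : Nat) (c : Char) : Option Nat :=
  ((lb.drop tb).findIdx? (· == c)).map (· + tb)

-- one greedy step over the state (tb, e)
def stepC (lb : List Char) (s : Nat × List Char) (c : Char) : Nat × List Char :=
  match find1 lb s.1 c with
  | none => s
  | some j => (j + 1, s.2 ++ [c])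

-- the greedy string for an Int start index (-1 encodes Python's best_i = -1)
def Gr (la lb : List Char) (i : Int) : List Char :=
  if i < 0 then [] else ((la.drop i.toNat).foldl (stepC lb) (0, ([] : List Char))).2

lemma find1_of_le (lb : List Char) (tb : Nat) (c : Char) (h : lb.length ≤ tb) :
    find1 lb tb c = none := by
  simp [find1, List.drop_eq_nil_of_le h]

lemma find1_unfold (lb : List Char) (tb : Nat) (c : Char) (h : tb < lb.length) :
    find1 lb tb c = if lb[tb] == c then some tb else find1 lb (tb + 1) c := by
  unfold find1
  rw [List.drop_eq_getElem_cons h, List.findIdx?_cons]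
  split
  · simp
  · simp [Option.map_map]
    congr 1; ext j; omega

lemma find1_cons_succ (x : Char) (xs : List Char) (k : Nat) (c : Char) :
    find1 (x :: xs) (k+1) c = (find1 xs k c).map (· + 1) := by
  unfold find1
  rw [show (x :: xs).drop (k+1) = xs.drop k from rfl, Option.map_map]
  cases (xs.drop k).findIdx? (· == c) <;> simp

lemma find1_cons_zero (x : Char) (xs : List Char) (c : Char) :
    find1 (x :: xs) 0 c = if x == c then some 0 else (find1 xs 0 c).map (· + 1) := by
  rw [find1_unfold (x :: xs) 0 c (by simp)]
  simp [find1_cons_succ]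

lemma find1_bounds (lb : List Char) (tb : Nat) (c : Char) (j : Nat)
    (h : find1 lb tb c = some j) : tb ≤ j ∧ j < lb.length := by
  unfold find1 at h
  obtain ⟨i, hi, rfl⟩ := Option.map_eq_some_iff.mp h
  have := List.findIdx?_eq_some_iff_findIdx_eq.mp hi
  have hlen : i < (lb.drop tb).length := this.1
  simp [List.length_drop] at hlen
  omega

lemma pyRange_nil {a b : Int} (h : b ≤ a) : PySem.List.pyRange a b = [] := by
  rw [PySem.List.pyRange_of_pos a b (by norm_num)]
  rw [if_neg (by omega)]
  simp

-- A's innermost loop is exactly the first-occurrence search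
lemma jloopA_eq (lb : List Char) (c : Char) (tb : Nat) (s : Int × List Char) :
    jloopA lb c (PySem.List.pyRange tb lb.length) s =
      match find1 lb tb c with
      | none => s
      | some j => ((j : Int) + 1, s.2 ++ [c]) := by
  generalize hk : lb.length - tb = k
  induction k generalizing tb with
  | zero =>
    rw [pyRange_nil (by omega), find1_of_le lb tb c (by omega)]
    rfl
  | succ k ih =>
    have htb : tb < lb.length := by omega
    rw [PySem.List.pyRange_one_cons (by exact_mod_cast htb)]
    rw [find1_unfold lb tb c htb]
    show (if PySem.List.pyGetD lb (tb : Int) ' ' == c then ((tb : Int) + 1, s.2 ++ [c])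
          else jloopA lb c (PySem.List.pyRange ((tb : Int) + 1) lb.length) s) = _
    rw [PySem.List.pyGetD_natCast, List.getD_eq_getElem lb ' ' htb]
    by_cases hc : lb[tb] == c
    · simp [hc]
    · rw [if_neg hc, if_neg hc]
      have : ((tb : Int) + 1) = ((tb + 1 : Nat) : Int) := by push_cast; ring
      rw [this, ih (tb + 1) (by omega)]

-- A's middle loop is the greedy fold over the suffix of a
lemma iloopA_eq (la lb : List Char) (ta tb : Nat) (e : List Char) (h : ta ≤ la.length) :
    (PySem.List.pyRange ta la.length).foldl
        (fun (ie : Int × List Char) i =>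
          jloopA lb (PySem.List.pyGetD la i ' ') (PySem.List.pyRange ie.1 lb.length) ie)
        ((tb : Int), e)
      = ((((la.drop ta).foldl (stepC lb) (tb, e)).1 : Int),
          ((la.drop ta).foldl (stepC lb) (tb, e)).2) := by
  generalize hk : la.length - ta = k
  induction k generalizing ta tb e with
  | zero =>
    rw [pyRange_nil (by omega), List.drop_eq_nil_of_le (by omega)]
    rfl
  | succ k ih =>
    have hta : ta < la.length := by omega
    rw [PySem.List.pyRange_one_cons (by exact_mod_cast hta),
        List.drop_eq_getElem_cons hta]
    rw [List.foldl_cons, List.foldl_cons]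
    show (PySem.List.pyRange ((ta:Int)+1) la.length).foldl _
        (jloopA lb (PySem.List.pyGetD la (ta:Int) ' ') (PySem.List.pyRange (tb:Int) lb.length) ((tb:Int), e)) = _
    rw [PySem.List.pyGetD_natCast, List.getD_eq_getElem la ' ' hta, jloopA_eq]
    have hcast : ((ta : Int) + 1) = ((ta + 1 : Nat) : Int) := by push_cast; ring
    cases hf : find1 lb tb la[ta] with
    | none =>
      simp only [stepC, hf]
      rw [hcast, ih (ta+1) tb e (by omega) (by omega)]
    | some j =>
      simp only [stepC, hf]
      show (PySem.List.pyRange ((ta:Int)+1) la.length).foldl _ ((j:Int)+1, e ++ [la[ta]]) = _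
      have : ((j : Int) + 1) = ((j + 1 : Nat) : Int) := by push_cast; ring
      rw [this, hcast, ih (ta+1) (j+1) (e ++ [la[ta]]) (by omega) (by omega)]

lemma iloopA_eq0 (la lb : List Char) (ta : Nat) (h : ta ≤ la.length) :
    (PySem.List.pyRange ta la.length).foldl
        (fun (ie : Int × List Char) i =>
          jloopA lb (PySem.List.pyGetD la i ' ') (PySem.List.pyRange ie.1 lb.length) ie)
        (0, [])
      = ((((la.drop ta).foldl (stepC lb) (0, [])).1 : Int),
          ((la.drop ta).foldl (stepC lb) (0, [])).2) := by
  have h2 := iloopA_eq la lb ta 0 [] h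
  simpa using h2

-- A's outer loop collects the greedy result of every suffix, in order
lemma outerA_eq (la lb : List Char) (k : Nat) (acc : List (List Char)) (h : k ≤ la.length) :
    (PySem.List.pyRange k la.length).foldl
        (fun (s : Int × List (List Char)) _y =>
          let inner := (PySem.List.pyRange s.1 la.length).foldl
            (fun (ie : Int × List Char) i =>
              jloopA lb (PySem.List.pyGetD la i ' ') (PySem.List.pyRange ie.1 lb.length) ie)
            (0, [])
          (s.1 + 1, s.2 ++ [inner.2]))
        ((k : Int), acc)
      = ((la.length : Int),
          acc ++ (PySem.List.pyRange k la.length).map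
            (fun ta => ((la.drop ta.toNat).foldl (stepC lb) (0, [])).2)) := by
  generalize hk : la.length - k = m
  induction m generalizing k acc with
  | zero =>
    have : k = la.length := by omega
    subst this
    rw [pyRange_nil (by omega)]
    simp
  | succ m ih =>
    have hki : k < la.length := by omega
    rw [PySem.List.pyRange_one_cons (by exact_mod_cast hki)]
    rw [List.foldl_cons, List.map_cons]
    show (PySem.List.pyRange ((k:Int)+1) la.length).foldl _
        ((k : Int) + 1, acc ++ [((PySem.List.pyRange (k:Int) la.length).foldl _ (0, [])).2]) = _
    rw [iloopA_eq0 la lb k (le_of_lt hki)]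
    have hcast : ((k : Int) + 1) = ((k + 1 : Nat) : Int) := by push_cast; ring
    rw [hcast, ih (k+1) _ (by omega) (by omega)]
    simp

lemma outerA0 (la lb : List Char) :
    (PySem.List.pyRange 0 la.length).foldl
        (fun (s : Int × List (List Char)) _y =>
          let inner := (PySem.List.pyRange s.1 la.length).foldl
            (fun (ie : Int × List Char) i =>
              jloopA lb (PySem.List.pyGetD la i ' ') (PySem.List.pyRange ie.1 lb.length) ie)
            (0, [])
          (s.1 + 1, s.2 ++ [inner.2]))
        (0, [])
      = ((la.length : Int),
          (PySem.List.pyRange 0 la.length).map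
            (fun ta => ((la.drop ta.toNat).foldl (stepC lb) (0, [])).2)) := by
  have h := outerA_eq la lb 0 [] (Nat.zero_le _)
  simpa using h

lemma tblB_cons_exists (lb : List Char) (off : Int) :
    ∃ d t', tblB lb off = d :: t' := by
  cases lb <;> simp [tblB]

-- B's table entry p is the first-occurrence search from position p (shifted by off)
lemma tblB_get (lb : List Char) (off : Int) (p : Nat) (c : Char) (h : p ≤ lb.length) :
    PySem.Dict.get? ((tblB lb off).getD p PySem.Dict.empty) c
      = (find1 lb p c).map (fun j : Nat => (j : Int) + off) := by
  induction lb generalizing off p with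
  | nil =>
    have hp : p = 0 := by simpa using h
    subst hp
    simp [tblB, find1_of_le]
  | cons x rest ih =>
    obtain ⟨d0, t', ht⟩ := tblB_cons_exists rest (off + 1)
    cases p with
    | zero =>
      show PySem.Dict.get? (PySem.Dict.insert ((tblB rest (off+1)).headD PySem.Dict.empty) x off) c = _
      rw [find1_cons_zero]
      by_cases hc : c = x
      · subst hc
        rw [PySem.Dict.get?_insert_self, if_pos (beq_self_eq_true _)]
        simp only [Option.map_some]
        norm_num
      · rw [PySem.Dict.get?_insert_of_ne _ _ hc]
        have h0 : ((tblB rest (off+1)).headD PySem.Dict.empty) = (tblB rest (off+1)).getD 0 PySem.Dict.empty := by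
          rw [ht]; rfl
        rw [h0, ih (off+1) 0 (by omega)]
        rw [if_neg (fun hcontr => hc (beq_iff_eq.mp hcontr).symm)]
        cases find1 rest 0 c <;> simp only [Option.map_some, Option.map_none] <;> try (congr 1; push_cast; ring)
    | succ k =>
      show PySem.Dict.get? ((tblB rest (off+1)).getD k PySem.Dict.empty) c = _
      rw [ih (off+1) k (by simpa using h), find1_cons_succ]
      cases find1 rest k c <;> simp only [Option.map_some, Option.map_none] <;> try (congr 1; push_cast; ring)

-- the greedy fold only appends to its string component
lemma foldl_stepC_shift (lb cs : List Char) (p : Nat) (e : List Char) :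
    cs.foldl (stepC lb) (p, e)
      = ((cs.foldl (stepC lb) (p, [])).1, e ++ (cs.foldl (stepC lb) (p, [])).2) := by
  induction cs generalizing p e with
  | nil => simp
  | cons c rest ih =>
    rw [List.foldl_cons, List.foldl_cons]
    cases hf : find1 lb p c with
    | none => simp only [stepC, hf]; exact ih p e
    | some j =>
      simp only [stepC, hf, List.nil_append]
      rw [ih (j+1) (e ++ [c]), ih (j+1) [c]]
      simp

-- greedy-string recursion
lemma greedy_cons (lb : List Char) (c : Char) (cs : List Char) (p : Nat) :
    ((c :: cs).foldl (stepC lb) (p, ([] : List Char))).2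
      = match find1 lb p c with
        | none => (cs.foldl (stepC lb) (p, ([] : List Char))).2
        | some j => c :: (cs.foldl (stepC lb) (j + 1, ([] : List Char))).2 := by
  rw [List.foldl_cons]
  cases hf : find1 lb p c with
  | none => simp [stepC, hf]
  | some j =>
    simp only [stepC, hf, List.nil_append]
    rw [foldl_stepC_shift lb cs (j+1) [c]]
    simp

-- first row of the DP pair = lengths of greedy matches of cs into lb
lemma col_fst (lb cs : List Char) (pos : Nat) (hpos : pos ≤ lb.length) :
    PySem.List.pyGetD (colB (tblB lb 0) lb.length cs).1 (pos : Int) 0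
      = ((cs.foldl (stepC lb) (pos, ([] : List Char))).2.length : Int) := by
  induction cs generalizing pos with
  | nil =>
    show PySem.List.pyGetD (List.replicate (lb.length + 1) (0 : Int)) (pos : Int) 0 = _
    rw [PySem.List.pyGetD_natCast]
    have hlt : pos < lb.length + 1 := by omega
    simp [List.getD, hlt]
  | cons c rest ih =>
    show PySem.List.pyGetD
        (mkRowB (tblB lb 0) lb.length c (colB (tblB lb 0) lb.length rest).1)
        (pos : Int) 0 = _
    unfold mkRowB
    have hcast : ((lb.length : Int) + 1) = (((lb.length + 1 : Nat)) : Int) := by push_cast; ring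
    rw [hcast, PySem.List.pyGetD_map_pyRange _ (lb.length + 1) pos 0 (by omega)]
    rw [greedy_cons]
    have hget : PySem.List.pyGetD (tblB lb 0) (pos : Int) PySem.Dict.empty
        = (tblB lb 0).getD pos PySem.Dict.empty := PySem.List.pyGetD_natCast _ _ _
    rw [hget, tblB_get lb 0 pos c hpos]
    cases hf : find1 lb pos c with
    | none => simp only [Option.map_none]; exact ih pos hpos
    | some j =>
      simp only [Option.map_some]
      have hj := find1_bounds lb pos c j hf
      have : ((j : Int) + 0 + 1) = (((j + 1 : Nat)) : Int) := by push_cast; ring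
      rw [this, ih (j + 1) (by omega)]
      simp only [List.length_cons]
      push_cast
      ring

-- entry i of the first column = length of the greedy match of the suffix from i
lemma col0_get (lb cs : List Char) (i : Nat) (hi : i < cs.length) :
    PySem.List.pyGetD (colB (tblB lb 0) lb.length cs).2 (i : Int) 0
      = (((cs.drop i).foldl (stepC lb) (0, ([] : List Char))).2.length : Int) := by
  induction cs generalizing i with
  | nil => simp at hi
  | cons c rest ih =>
    cases i with
    | zero =>
      show PySem.List.pyGetD
          (PySem.List.pyGetD (colB (tblB lb 0) lb.length (c :: rest)).1 0 0
            :: (colB (tblB lb 0) lb.length rest).2) ((0 : Nat) : Int) 0 = _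
      rw [show (((0 : Nat)) : Int) = (0 : Int) from rfl, PySem.List.pyGetD_zero_cons]
      have h := col_fst lb (c :: rest) 0 (Nat.zero_le _)
      simp only [Nat.cast_zero] at h
      rw [h]
      rfl
    | succ k =>
      show PySem.List.pyGetD
          (PySem.List.pyGetD (colB (tblB lb 0) lb.length (c :: rest)).1 0 0
            :: (colB (tblB lb 0) lb.length rest).2) (((k + 1 : Nat)) : Int) 0 = _
      rw [PySem.List.pyGetD_natCast, List.getD_cons_succ, ← PySem.List.pyGetD_natCast]
      exact ih k (by simpa using hi)

-- B's reconstruction loop is the greedy fold over the suffix of a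
lemma reconB_eq (la lb : List Char) (ta tb : Nat) (e : List Char)
    (h : ta ≤ la.length) (htb : tb ≤ lb.length) :
    (PySem.List.pyRange ta la.length).foldl
        (fun (s : List Char × Int) i =>
          match PySem.Dict.get? (PySem.List.pyGetD (tblB lb 0) s.2 PySem.Dict.empty)
              (PySem.List.pyGetD la i ' ') with
          | none => s
          | some j => (s.1 ++ [PySem.List.pyGetD la i ' '], j + 1))
        (e, (tb : Int))
      = (((la.drop ta).foldl (stepC lb) (tb, e)).2,
          (((la.drop ta).foldl (stepC lb) (tb, e)).1 : Int)) := by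
  generalize hk : la.length - ta = k
  induction k generalizing ta tb e with
  | zero =>
    rw [pyRange_nil (by omega), List.drop_eq_nil_of_le (by omega)]
    rfl
  | succ k ih =>
    have hta : ta < la.length := by omega
    rw [PySem.List.pyRange_one_cons (by exact_mod_cast hta),
        List.drop_eq_getElem_cons hta]
    rw [List.foldl_cons, List.foldl_cons]
    show (PySem.List.pyRange ((ta:Int)+1) la.length).foldl _
        (match PySem.Dict.get? (PySem.List.pyGetD (tblB lb 0) (tb : Int) PySem.Dict.empty)
            (PySem.List.pyGetD la (ta : Int) ' ') with
         | none => (e, (tb : Int))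
         | some j => (e ++ [PySem.List.pyGetD la (ta : Int) ' '], j + 1)) = _
    rw [PySem.List.pyGetD_natCast la, List.getD_eq_getElem la ' ' hta]
    have hget : PySem.List.pyGetD (tblB lb 0) (tb : Int) PySem.Dict.empty
        = (tblB lb 0).getD tb PySem.Dict.empty := PySem.List.pyGetD_natCast _ _ _
    rw [hget, tblB_get lb 0 tb la[ta] htb]
    have hcast : ((ta : Int) + 1) = ((ta + 1 : Nat) : Int) := by push_cast; ring
    cases hf : find1 lb tb la[ta] with
    | none =>
      simp only [Option.map_none, stepC, hf]
      rw [hcast, ih (ta+1) tb e (by omega) htb (by omega)]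
    | some j =>
      simp only [Option.map_some, stepC, hf]
      have hj := find1_bounds lb tb la[ta] j hf
      show (PySem.List.pyRange ((ta:Int)+1) la.length).foldl _ (e ++ [la[ta]], (j:Int)+0+1) = _
      have hc1 : ((j : Int) + 0 + 1) = ((j + 1 : Nat) : Int) := by push_cast; ring
      rw [hc1, hcast, ih (ta+1) (j+1) (e ++ [la[ta]]) (by omega) (by omega) (by omega)]

-- A's first-strict-max scan over the strings = B's first-strict-max scan over the DP lengths
lemma sel_eq (la lb : List Char) (k : Nat) (hk : k ≤ la.length) (v : Int) (bi : Int) :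
    ((PySem.List.pyRange k la.length).foldl
        (fun (s : Int × List Char) ta =>
          if ((Gr la lb ta).length : Int) > s.1
          then (((Gr la lb ta).length : Int), Gr la lb ta) else s)
        (v, Gr la lb bi)).2
      = Gr la lb (((PySem.List.pyRange k la.length).foldl
          (fun (s : Int × Int) i =>
            let w := PySem.List.pyGetD (colB (tblB lb 0) lb.length la).2 i 0
            if w > s.1 then (w, i) else s)
          (v, bi)).2) := by
  generalize hm : la.length - k = m
  induction m generalizing k v bi with
  | zero =>
    rw [pyRange_nil (by omega)]
    rfl
  | succ m ih =>
    have hki : k < la.length := by omega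
    rw [PySem.List.pyRange_one_cons (by exact_mod_cast hki)]
    rw [List.foldl_cons, List.foldl_cons]
    have hw : (PySem.List.pyGetD (colB (tblB lb 0) lb.length la).2 (k : Int) 0)
        = ((Gr la lb (k : Int)).length : Int) := by
      rw [col0_get lb la k hki]
      have : Gr la lb (k : Int) = ((la.drop k).foldl (stepC lb) (0, ([] : List Char))).2 := by
        unfold Gr
        rw [if_neg (by omega)]
        simp
      rw [this]
    simp only [hw]
    by_cases hlt : ((Gr la lb (k : Int)).length : Int) > v
    · rw [if_pos hlt, if_pos hlt]
      have hcast : ((k : Int) + 1) = ((k + 1 : Nat) : Int) := by push_cast; ring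
      rw [hcast]
      exact ih (k+1) (by omega) _ (k : Int) (by omega)
    · rw [if_neg hlt, if_neg hlt]
      have hcast : ((k : Int) + 1) = ((k + 1 : Nat) : Int) := by push_cast; ring
      rw [hcast]
      exact ih (k+1) (by omega) v bi (by omega)

-- the selected index stays below n
lemma sel_bound (la lb : List Char) (k : Nat) (v : Int) (bi : Int) (hbi : bi < (la.length : Int)) :
    ((PySem.List.pyRange k la.length).foldl
        (fun (s : Int × Int) i =>
          let w := PySem.List.pyGetD (colB (tblB lb 0) lb.length la).2 i 0
          if w > s.1 then (w, i) else s)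
        (v, bi)).2 < (la.length : Int) := by
  generalize hm : la.length - k = m
  induction m generalizing k v bi with
  | zero =>
    by_cases h : k ≤ la.length
    · rw [pyRange_nil (by omega)]; exact hbi
    · rw [pyRange_nil (by exact_mod_cast (by omega : (la.length : Int) ≤ k))]; exact hbi
  | succ m ih =>
    have hki : k < la.length := by omega
    rw [PySem.List.pyRange_one_cons (by exact_mod_cast hki)]
    rw [List.foldl_cons]
    have hcast : ((k : Int) + 1) = ((k + 1 : Nat) : Int) := by push_cast; ring
    by_cases hlt : (PySem.List.pyGetD (colB (tblB lb 0) lb.length la).2 (k : Int) 0) > v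
    · simp only [if_pos hlt]
      rw [hcast]
      exact ih (k+1) _ (k : Int) (by exact_mod_cast hki) (by omega)
    · simp only [if_neg hlt]
      rw [hcast]
      exact ih (k+1) v bi hbi (by omega)

lemma main_eq (a b : String) : check a b = check_alt a b := by
  unfold check check_alt
  dsimp only
  rw [outerA0]
  dsimp only
  rw [List.foldl_map]
  -- rewrite A's fold into the Gr form (every ta in the range is nonnegative)
  have hcong :
      (PySem.List.pyRange 0 (a.toList.length : Int)).foldl
        (fun (s : Int × List Char) ta =>
          if ((((a.toList.drop ta.toNat).foldl (stepC b.toList) (0, [])).2.length : Int)) > s.1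
          then ((((a.toList.drop ta.toNat).foldl (stepC b.toList) (0, [])).2.length : Int),
                ((a.toList.drop ta.toNat).foldl (stepC b.toList) (0, [])).2)
          else s) (0, [])
      = (PySem.List.pyRange 0 (a.toList.length : Int)).foldl
        (fun (s : Int × List Char) ta =>
          if ((Gr a.toList b.toList ta).length : Int) > s.1
          then (((Gr a.toList b.toList ta).length : Int), Gr a.toList b.toList ta) else s)
        (0, Gr a.toList b.toList (-1)) := by
    have hGr0 : Gr a.toList b.toList (-1) = ([] : List Char) := by unfold Gr; simp
    rw [hGr0]
    apply PySem.List.foldl_congr_mem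
    intro acc x hx
    have hx' := PySem.List.mem_pyRange_one.mp hx
    have hGr : Gr a.toList b.toList x = ((a.toList.drop x.toNat).foldl (stepC b.toList) (0, [])).2 := by
      unfold Gr; rw [if_neg (by omega)]
    rw [hGr]
  rw [hcong]
  have hsel := sel_eq a.toList b.toList 0 (Nat.zero_le _) 0 (-1)
  simp only [Nat.cast_zero] at hsel
  rw [hsel]
  have hbnd := sel_bound a.toList b.toList 0 0 (-1)
    (by have := Int.natCast_nonneg a.toList.length; omega)
  simp only [Nat.cast_zero] at hbnd
  set bi := ((PySem.List.pyRange 0 (a.toList.length : Int)).foldl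
      (fun (s : Int × Int) i =>
        let w := PySem.List.pyGetD (colB (tblB b.toList 0) b.toList.length a.toList).2 i 0
        if w > s.1 then (w, i) else s)
      (0, -1)).2 with hbi
  by_cases hneg : bi < 0
  · rw [if_pos hneg]
    unfold Gr
    rw [if_pos hneg]
  · rw [if_neg hneg]
    have h0 : (0 : Int) ≤ bi := by omega
    have hcast : bi = ((bi.toNat : Nat) : Int) := (Int.toNat_of_nonneg h0).symm
    have hrec := reconB_eq a.toList b.toList bi.toNat 0 [] (by omega) (Nat.zero_le _)
    simp only [Nat.cast_zero] at hrec
    rw [hcast, hrec]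
    unfold Gr
    rw [if_neg (by omega)]
    rw [Int.toNat_natCast]

-- ===== VERDICT (by name: the statement is the Claim_ definition above) =====
theorem check_spec : Claim_equal_check := by
  intro a b _
  show check a b = check_alt a b
  exact main_eq a b
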